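-- pv_equiv track=rewrite | github.com/Leedong-uk/algorithms-in-python | 2025/1월/1월22일/programmers2.py | solution
-- ===== SOURCE A (Python) =====
-- from collections import Counter
--
-- def solution(want, number, discount):
--     cnt = 0
--     want_dic = Counter({want[i]: number[i] for i in range(len(want))})
--     window = Counter(discount[:10])
--
--
--     if not (want_dic - window):
--         cnt += 1
--
--
--     for i in range(10, len(discount)):
--
--         window[discount[i]] += 1
--         window[discount[i-10]] -= 1
--         if window[discount[i-10]] == 0:
--             del window[discount[i-10]]
--
--
--         if not (want_dic - window):
--             cnt += 1
--
--     return cnt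
-- ===== SOURCE B (Python) =====
-- def solution(want, number, discount):
--     want_dic = dict(zip(want, number))
--     cnt = 0
--     for s in range(max(1, len(discount) - 9)):
--         window = discount[s:s + 10]
--         if all(window.count(k) >= v for k, v in want_dic.items()):
--             cnt += 1
--     return cnt
-- ===== Notes on version B (the rewrite author's own statement) =====
-- stated objective: simpler
-- what changed: B drops A's incrementally-maintained Counter window and Counter subtraction entirely: for each window start it takes a fresh 10-day slice and checks each wanted item's quantity directly with list.count inside a short-circuiting all().
import Mathlib
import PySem

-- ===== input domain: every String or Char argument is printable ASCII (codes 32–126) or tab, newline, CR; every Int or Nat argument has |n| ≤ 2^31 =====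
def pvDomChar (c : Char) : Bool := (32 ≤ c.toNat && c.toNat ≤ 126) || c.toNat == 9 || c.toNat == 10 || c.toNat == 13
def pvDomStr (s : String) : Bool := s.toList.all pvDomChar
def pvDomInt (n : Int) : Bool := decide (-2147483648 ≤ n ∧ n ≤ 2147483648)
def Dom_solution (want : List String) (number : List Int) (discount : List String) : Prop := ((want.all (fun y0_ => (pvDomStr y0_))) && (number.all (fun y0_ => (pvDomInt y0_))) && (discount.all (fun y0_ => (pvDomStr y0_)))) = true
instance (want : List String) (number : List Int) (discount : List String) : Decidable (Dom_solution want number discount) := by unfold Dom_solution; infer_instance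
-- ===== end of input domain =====

-- B replaces A's incrementally-maintained Counter window and Counter subtraction by a fresh
-- 10-day slice per start index, checked directly with list.count — simpler, same results.

-- ===== PORT A =====
-- Counter.__sub__ (CPython): keep positive self−other counts, then the positive negations of
-- other's counts on keys absent from self.
def pvCounterSub (a b : PySem.Dict String Int) : PySem.Dict String Int :=
  let r := a.items.foldl
    (fun acc kv => if 0 < kv.2 - b.getD kv.1 0 then acc.insert kv.1 (kv.2 - b.getD kv.1 0) else acc)
    PySem.Dict.empty
  b.items.foldl
    (fun acc kv => if a.contains kv.1 then acc
      else if 0 < 0 - kv.2 then acc.insert kv.1 (0 - kv.2) else acc) r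

-- `not (want_dic - window)`: a Counter is falsy iff it is empty
def pvSubEmpty (a b : PySem.Dict String Int) : Bool := (pvCounterSub a b).size == 0

-- one iteration of A's `for i in range(10, len(discount))` loop, state = (window, cnt)
def pvStepA (wd : PySem.Dict String Int) (discount : List String)
    (st : PySem.Dict String Int × Int) (i : Int) : PySem.Dict String Int × Int :=
  let x := PySem.List.pyGetD discount i ""
  let y := PySem.List.pyGetD discount (i - 10) ""
  let w1 := st.1.insert x (st.1.getD x 0 + 1)
  let w2 := w1.insert y (w1.getD y 0 - 1)
  let w3 := if w2.getD y 0 == 0 then w2.erase y else w2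
  (w3, if pvSubEmpty wd w3 then st.2 + 1 else st.2)

-- pyGetD defaults are unreachable: i ranges over [0, len want) resp. [10, len discount),
-- and Pre_solution gives len want ≤ len number
def solution (want : List String) (number : List Int) (discount : List String) : Int :=
  let wd := (PySem.List.pyRange 0 (want.length : Int) 1).foldl
      (fun d i => d.insert (PySem.List.pyGetD want i "") (PySem.List.pyGetD number i 0))
      PySem.Dict.empty
  let window := PySem.Dict.counter (PySem.List.slice discount none (some 10))
  let cnt : Int := if pvSubEmpty wd window then 0 + 1 else 0
  ((PySem.List.pyRange 10 (discount.length : Int) 1).foldl (pvStepA wd discount) (window, cnt)).2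

-- ===== PORT B =====
def solution_alt (want : List String) (number : List Int) (discount : List String) : Int :=
  let wd := (want.zip number).foldl (fun d kv => d.insert kv.1 kv.2) PySem.Dict.empty
  (PySem.List.pyRange 0 (max 1 ((discount.length : Int) - 9)) 1).foldl
    (fun cnt s =>
      let window := PySem.List.slice discount (some s) (some (s + 10))
      if wd.items.all (fun kv => decide (kv.2 ≤ (window.count kv.1 : Int))) then cnt + 1 else cnt)
    0

-- ===== PRECONDITION & SPEC =====
-- A's dict comprehension indexes number[i] for every i < len(want): it raises IndexError when
-- want is longer than number; those inputs are excluded (B's dict(zip(...)) would truncate).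
def Pre_solution (want : List String) (number : List Int) (discount : List String) : Prop :=
  want.length ≤ number.length
instance (want : List String) (number : List Int) (discount : List String) : Decidable (Pre_solution want number discount) := by unfold Pre_solution; infer_instance
def pvWitness_solution : List String × List Int × List String :=
  (["mask"], [2], ["mask", "mask", "rice"])

def Spec_solution (want : List String) (number : List Int) (discount : List String) (out : Int) : Prop := out = solution_alt want number discount
instance (want : List String) (number : List Int) (discount : List String) (out : Int) : Decidable (Spec_solution want number discount out) := by unfold Spec_solution; infer_instance

-- ===== CLAIM (what is proved, stated in full; the proofs are below) =====
def Claim_equal_solution : Prop := ∀ (want : List String) (number : List Int) (discount : List String), Dom_solution want number discount → Pre_solution want number discount → Spec_solution want number discount (solution want number discount)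

-- ===== LEMMAS AND PROOFS =====

-- the 10-day window starting at day s, and B's per-window check
def pvWin (discount : List String) (s : Nat) : List String := (discount.drop s).take 10

def pvCheck (wd : PySem.Dict String Int) (win : List String) : Bool :=
  wd.items.all (fun kv => decide (kv.2 ≤ (win.count kv.1 : Int)))

-- invariant of A's loop: the window dict has nodup keys, positive stored counts, and its
-- lookups are exactly the counts of the current 10-day window
def pvInv (discount : List String) (s : Nat) (w : PySem.Dict String Int) : Prop :=
  w.keys.Nodup ∧ (∀ kv ∈ w.items, (0:Int) < kv.2) ∧
    ∀ k, w.getD k 0 = ((pvWin discount s).count k : Int)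

lemma pv_fold_idx_eq_zip : ∀ (ws : List String) (ms : List Int) (d : PySem.Dict String Int),
    ws.length ≤ ms.length →
    (List.range ws.length).foldl (fun d i => d.insert (ws.getD i "") (ms.getD i 0)) d
      = (ws.zip ms).foldl (fun d kv => d.insert kv.1 kv.2) d := by
  intro ws
  induction ws with
  | nil => intro ms d _; simp
  | cons w ws ih =>
    intro ms d h
    cases ms with
    | nil => simp at h
    | cons m ms =>
      simp only [List.length_cons, List.range_succ_eq_map, List.foldl_cons, List.foldl_map,
        List.zip_cons_cons, List.getD_cons_zero, List.getD_cons_succ]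
      exact ih ms _ (by simpa using h)

lemma pv_wd_eq (want : List String) (number : List Int) (h : want.length ≤ number.length) :
    (PySem.List.pyRange 0 (want.length : Int) 1).foldl
      (fun d i => d.insert (PySem.List.pyGetD want i "") (PySem.List.pyGetD number i 0))
      PySem.Dict.empty
    = (want.zip number).foldl (fun d kv => d.insert kv.1 kv.2) PySem.Dict.empty := by
  rw [PySem.List.pyRange_zero_nat, List.foldl_map]
  rw [← pv_fold_idx_eq_zip want number _ h]
  congr 1
  funext d i
  rw [PySem.List.pyGetD_natCast, PySem.List.pyGetD_natCast]

lemma pv_erase_get? (d : PySem.Dict String Int) (k j : String) :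
    (d.erase k).get? j = if j = k then none else d.get? j := by
  have h : ∀ (l : List (String × Int)),
      (l.filter (fun p => !(p.1 == k))).find? (fun p => p.1 == j)
        = if j = k then none else l.find? (fun p => p.1 == j) := by
    intro l
    by_cases hjk : j = k
    · subst hjk
      rw [if_pos rfl, List.find?_eq_none]
      intro x hx
      simpa using (List.mem_filter.mp hx).2
    · rw [if_neg hjk]
      induction l with
      | nil => simp
      | cons p l ih =>
        have hkj : ¬ k = j := fun h => hjk h.symm
        rw [List.filter_cons, List.find?_cons]
        by_cases hpj : p.1 = j
        · have hpk : ¬ p.1 = k := by rw [hpj]; exact hjk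
          simp [hpj, hjk]
        · have hb2 : (p.1 == j) = false := by simp [hpj]
          by_cases hpk : p.1 = k
          · have hb : (k == j) = false := by simp [hkj]
            simp [hpk, hb, ih]
          · simp [hpk, hb2, ih]
  simp only [PySem.Dict.erase, PySem.Dict.get?, h]
  split <;> simp

lemma pv_erase_getD (d : PySem.Dict String Int) (k j : String) (v : Int) :
    (d.erase k).getD j v = if j = k then v else d.getD j v := by
  simp only [PySem.Dict.getD, pv_erase_get?]
  split <;> simp

lemma pv_erase_nodup (d : PySem.Dict String Int) (k : String) (h : d.keys.Nodup) :
    (d.erase k).keys.Nodup := by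
  have : (d.erase k).keys.Sublist d.keys := by
    simp only [PySem.Dict.keys, PySem.Dict.erase]
    exact List.Sublist.map _ List.filter_sublist
  exact h.sublist this

lemma pv_erase_mem_items (d : PySem.Dict String Int) (k : String) (p : String × Int) :
    p ∈ (d.erase k).items ↔ p ∈ d.items ∧ ¬ p.1 = k := by
  simp [PySem.Dict.erase, List.mem_filter]

lemma pv_size_insert_ne_zero (d : PySem.Dict String Int) (k : String) (v : Int) :
    ¬ (d.insert k v).size = 0 := by
  rw [PySem.Dict.size_insert]
  split
  · rename_i hc
    simp only [PySem.Dict.contains, List.any_eq_true] at hc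
    obtain ⟨p, hp, -⟩ := hc
    simp [PySem.Dict.size]
    exact List.ne_nil_of_mem hp
  · omega

lemma pv_fold1_empty (w : PySem.Dict String Int) :
    ∀ (l : List (String × Int)) (acc : PySem.Dict String Int),
    ((l.foldl (fun acc kv => if 0 < kv.2 - w.getD kv.1 0
        then acc.insert kv.1 (kv.2 - w.getD kv.1 0) else acc) acc).size == 0)
      = ((acc.size == 0) && l.all (fun kv => decide (kv.2 ≤ w.getD kv.1 0))) := by
  intro l
  induction l with
  | nil => intro acc; simp
  | cons p l ih =>
    intro acc
    simp only [List.foldl_cons, List.all_cons]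
    by_cases hp : 0 < p.2 - w.getD p.1 0
    · rw [if_pos hp, ih]
      have h1 : ¬ p.2 ≤ w.getD p.1 0 := by omega
      simp [pv_size_insert_ne_zero, h1]
    · rw [if_neg hp, ih]
      have h1 : p.2 ≤ w.getD p.1 0 := by omega
      simp [h1]

lemma pv_fold2_id (a : PySem.Dict String Int) :
    ∀ (l : List (String × Int)) (r : PySem.Dict String Int), (∀ kv ∈ l, (0:Int) < kv.2) →
    (l.foldl (fun acc kv => if a.contains kv.1 then acc
        else if 0 < 0 - kv.2 then acc.insert kv.1 (0 - kv.2) else acc) r) = r := by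
  intro l
  induction l with
  | nil => intro r _; rfl
  | cons p l ih =>
    intro r h
    have hp : (0:Int) < p.2 := h p (by simp)
    simp only [List.foldl_cons]
    have : ¬ ((0:Int) < 0 - p.2) := by omega
    split_ifs <;> exact ih r (fun kv hkv => h kv (by simp [hkv]))

lemma pv_subEmpty_eq_check (wd w : PySem.Dict String Int) (win : List String)
    (hpos : ∀ kv ∈ w.items, (0:Int) < kv.2)
    (hc : ∀ k, w.getD k 0 = (win.count k : Int)) :
    pvSubEmpty wd w = pvCheck wd win := by
  unfold pvSubEmpty pvCounterSub
  rw [pv_fold2_id wd w.items _ hpos, pv_fold1_empty]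
  simp [pvCheck, hc]

lemma pv_inv_counter (discount : List String) :
    pvInv discount 0 (PySem.Dict.counter (PySem.List.slice discount none (some 10))) := by
  have hslice : PySem.List.slice discount none (some 10) = pvWin discount 0 := by
    rw [PySem.List.slice_to discount (by norm_num)]
    simp [pvWin]
  refine ⟨PySem.Dict.nodup_keys_counter _, ?_, ?_⟩
  · intro kv hkv
    rw [PySem.Dict.items_counter] at hkv
    obtain ⟨k, hk, rfl⟩ := List.mem_map.mp hkv
    have : k ∈ PySem.List.slice discount none (some 10) :=
      (PySem.Set.mem_ofList _ _).mp hk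
    simpa using List.count_pos_iff.mpr this
  · intro k
    rw [PySem.Dict.getD_counter, hslice]

lemma pv_win_shift (discount : List String) (i : Nat) (h10 : 10 ≤ i) (hin : i < discount.length) :
    pvWin discount (i - 10) = discount[i - 10] :: ((discount.drop (i - 9)).take 9) ∧
    pvWin discount (i - 9) = ((discount.drop (i - 9)).take 9) ++ [discount[i]] := by
  constructor
  · unfold pvWin
    rw [List.drop_eq_getElem_cons (by omega)]
    rw [show i - 10 + 1 = i - 9 by omega]
    rfl
  · unfold pvWin
    rw [show (10:Nat) = 9 + 1 from rfl, List.take_add_one]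
    have h9 : 9 < (discount.drop (i - 9)).length := by simp; omega
    rw [List.getElem?_eq_getElem h9]
    congr 1
    simp [List.getElem_drop]
    congr 1
    omega

lemma pv_body_nat (wd : PySem.Dict String Int) (discount : List String) (s : Nat) (cnt : Int) :
    (if wd.items.all (fun kv => decide (kv.2 ≤
        ((PySem.List.slice discount (some (s : Int)) (some ((s : Int) + 10))).count kv.1 : Int)))
      then cnt + 1 else cnt)
    = (if pvCheck wd (pvWin discount s) then cnt + 1 else cnt) := by
  have h : PySem.List.slice discount (some (s : Int)) (some ((s : Int) + 10)) = pvWin discount s := by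
    have := PySem.List.slice_natCast_add discount s 10
    norm_num at this
    rw [this]
    rfl
  rw [h]
  rfl

lemma pv_step_inv (wd : PySem.Dict String Int) (discount : List String)
    (w : PySem.Dict String Int) (cnt : Int) (i : Nat) (h10 : 10 ≤ i) (hin : i < discount.length)
    (hw : pvInv discount (i - 10) w) :
    pvInv discount (i - 9) (pvStepA wd discount (w, cnt) (i : Int)).1 := by
  obtain ⟨hnd, hpos, hgd⟩ := hw
  have hx : PySem.List.pyGetD discount (i : Int) "" = discount[i] := by
    rw [PySem.List.pyGetD_natCast, List.getD_eq_getElem]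
  have hy : PySem.List.pyGetD discount ((i : Int) - 10) "" = discount[i - 10] := by
    rw [show (i : Int) - 10 = ((i - 10 : Nat) : Int) by omega]
    rw [PySem.List.pyGetD_natCast, List.getD_eq_getElem]
  obtain ⟨hsh1, hsh2⟩ := pv_win_shift discount i h10 hin
  set x := discount[i] with hxdef
  set y := discount[i - 10] with hydef
  set mid := (discount.drop (i - 9)).take 9 with hmid
  have hcnt_old : ∀ k, w.getD k 0 = (mid.count k : Int) + (if y = k then 1 else 0) := by
    intro k
    rw [hgd k, hsh1, List.count_cons]
    by_cases h : y = k
    · rw [if_pos h]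
      simp [h]
    · rw [if_neg h]
      simp [h]
  have hcnt_new : ∀ k, ((pvWin discount (i - 9)).count k : Int)
      = (mid.count k : Int) + (if x = k then 1 else 0) := by
    intro k
    rw [hsh2, List.count_append]
    by_cases h : x = k
    · rw [if_pos h]
      simp [h]
    · rw [if_neg h]
      simp [h]
  -- the two inserted dicts
  set w1 := w.insert x (w.getD x 0 + 1) with hw1
  set w2 := w1.insert y (w1.getD y 0 - 1) with hw2
  have h2 : ∀ k, w2.getD k 0 = ((pvWin discount (i - 9)).count k : Int) := by
    intro k
    rw [hw2, hw1]
    simp only [PySem.Dict.getD_insert]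
    rw [hcnt_new k]
    by_cases hky : k = y
    · rw [if_pos hky]
      by_cases hyx : y = x
      · have hxk : x = k := by rw [hky, hyx]
        rw [if_pos hyx, if_pos hxk, hcnt_old x, if_pos hyx, hky, hyx]
        omega
      · have hxk : ¬ x = k := by rw [hky]; exact fun h => hyx h.symm
        rw [if_neg hyx, if_neg hxk, hcnt_old y, if_pos rfl, hky]
        omega
    · rw [if_neg hky]
      by_cases hkx : k = x
      · have hyx : ¬ y = x := by rw [← hkx]; exact fun h => hky h.symm
        have hxk : x = k := hkx.symm
        rw [if_pos hkx, if_pos hxk, hcnt_old x, if_neg hyx, hkx]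
        omega
      · have hxk : ¬ x = k := fun h => hkx h.symm
        have hyk : ¬ y = k := fun h => hky h.symm
        rw [if_neg hkx, if_neg hxk, hcnt_old k, if_neg hyk]
        try omega
  have hnd2 : w2.keys.Nodup :=
    PySem.Dict.nodup_keys_insert _ _ _ (PySem.Dict.nodup_keys_insert _ _ _ hnd)
  have hpos2 : ∀ kv ∈ w2.items, kv.1 ≠ y → (0:Int) < kv.2 := by
    rintro ⟨a, v⟩ hkv hay
    rw [hw2, PySem.Dict.mem_items_insert] at hkv
    rcases hkv with h | ⟨hkv, -⟩
    · exact absurd (congrArg Prod.fst h) hay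
    · rw [hw1, PySem.Dict.mem_items_insert] at hkv
      rcases hkv with h | ⟨hkv, -⟩
      · have ha : a = x := congrArg Prod.fst h
        have hv : v = w.getD x 0 + 1 := congrArg Prod.snd h
        have h0 : (0:Int) ≤ w.getD x 0 := by
          rw [hcnt_old x]
          have hc : (0:Int) ≤ (mid.count x : Int) := by positivity
          split_ifs <;> omega
        simp only [] at hv ⊢
        omega
      · exact hpos _ hkv
  have hstep : (pvStepA wd discount (w, cnt) (i : Int)).1
      = if w2.getD y 0 == 0 then w2.erase y else w2 := by
    simp only [pvStepA, hx, hy, ← hw1, ← hw2]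
  rw [hstep]
  by_cases hc0 : w2.getD y 0 = 0
  · rw [if_pos (by simp [hc0])]
    refine ⟨pv_erase_nodup _ _ hnd2, ?_, ?_⟩
    · rintro ⟨a, v⟩ hkv
      rw [pv_erase_mem_items] at hkv
      exact hpos2 _ hkv.1 hkv.2
    · intro k
      rw [pv_erase_getD]
      split
      · rename_i hk
        rw [hk] at *
        rw [← h2 y, hc0]
      · exact h2 k
  · rw [if_neg (by simp [hc0])]
    refine ⟨hnd2, ?_, h2⟩
    rintro ⟨a, v⟩ hkv
    by_cases hay : a = y
    · have hv : v = w2.getD a 0 :=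
        (PySem.Dict.getD_of_mem_items w2 hkv hnd2 0).symm
      rw [hay] at hv
      have hcy := h2 y
      have hnn : (0:Int) ≤ ((pvWin discount (i - 9)).count y : Int) := by positivity
      omega
    · exact hpos2 _ hkv hay

lemma pvStepA_snd (wd : PySem.Dict String Int) (discount : List String)
    (st : PySem.Dict String Int × Int) (i : Int) :
    (pvStepA wd discount st i).2
      = if pvSubEmpty wd (pvStepA wd discount st i).1 then st.2 + 1 else st.2 := rfl

lemma pv_loopA (wd : PySem.Dict String Int) (discount : List String)
    (w0 : PySem.Dict String Int) (c0 : Int) (hw0 : pvInv discount 0 w0) :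
    ∀ (t : Nat), t + 10 ≤ discount.length →
    pvInv discount t ((PySem.List.pyRange 10 (10 + (t : Int)) 1).foldl
        (pvStepA wd discount) (w0, c0)).1 ∧
    ((PySem.List.pyRange 10 (10 + (t : Int)) 1).foldl (pvStepA wd discount) (w0, c0)).2
      = (PySem.List.pyRange 1 (1 + (t : Int)) 1).foldl
        (fun cnt s => if wd.items.all (fun kv => decide (kv.2 ≤
            ((PySem.List.slice discount (some s) (some (s + 10))).count kv.1 : Int)))
          then cnt + 1 else cnt) c0 := by
  intro t
  induction t with
  | zero =>
    intro _
    rw [show ((10:Int) + (0:Nat) = 10) by norm_num, PySem.List.pyRange_one_eq_nil (le_refl 10),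
      show ((1:Int) + (0:Nat) = 1) by norm_num, PySem.List.pyRange_one_eq_nil (le_refl 1)]
    exact ⟨hw0, rfl⟩
  | succ t ih =>
    intro ht
    have ht' : t + 10 ≤ discount.length := by omega
    obtain ⟨ihInv, ihCnt⟩ := ih ht'
    have hcast1 : (10 : Int) + ((t + 1 : Nat) : Int) = (10 + (t : Int)) + 1 := by push_cast; ring
    have hcast2 : (1 : Int) + ((t + 1 : Nat) : Int) = (1 + (t : Int)) + 1 := by push_cast; ring
    rw [hcast1, hcast2, PySem.List.pyRange_one_succ_right (by omega),
      PySem.List.pyRange_one_succ_right (by omega), List.foldl_append, List.foldl_append]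
    set st := (PySem.List.pyRange 10 (10 + (t : Int)) 1).foldl (pvStepA wd discount) (w0, c0)
      with hst
    have hielt : (10 + (t:Int)) = ((10 + t : Nat) : Int) := by push_cast; ring
    have hInv' : pvInv discount (t + 1) (pvStepA wd discount st ((10 + t : Nat) : Int)).1 := by
      have h := pv_step_inv wd discount st.1 st.2 (10 + t) (by omega) (by omega)
        (by rw [show (10 + t - 10 : Nat) = t by omega]; exact ihInv)
      rw [show (10 + t - 9 : Nat) = t + 1 by omega] at h
      exact h
    constructor
    · simp only [List.foldl_cons, List.foldl_nil]
      rw [hielt]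
      exact hInv'
    · simp only [List.foldl_cons, List.foldl_nil]
      have hsnd : (pvStepA wd discount st ((10 + t : Nat) : Int)).2
          = if pvCheck wd (pvWin discount (t + 1)) then st.2 + 1 else st.2 := by
        rw [pvStepA_snd]
        obtain ⟨-, hpos, hgd⟩ := hInv'
        rw [pv_subEmpty_eq_check wd _ (pvWin discount (t + 1)) hpos hgd]
      rw [hielt, hsnd, ihCnt]
      have hb := pv_body_nat wd discount (t + 1)
        ((PySem.List.pyRange 1 (1 + (t : Int)) 1).foldl
          (fun cnt s => if wd.items.all (fun kv => decide (kv.2 ≤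
              ((PySem.List.slice discount (some s) (some (s + 10))).count kv.1 : Int)))
            then cnt + 1 else cnt) c0)
      rw [show ((t + 1 : Nat) : Int) = 1 + (t : Int) by push_cast; ring] at hb
      rw [hb]

lemma pv_body_zero (wd : PySem.Dict String Int) (discount : List String) (cnt : Int) :
    (if wd.items.all (fun kv => decide (kv.2 ≤
        ((PySem.List.slice discount (some (0:Int)) (some ((0:Int) + 10))).count kv.1 : Int)))
      then cnt + 1 else cnt)
    = (if pvCheck wd (pvWin discount 0) then cnt + 1 else cnt) := by
  have := pv_body_nat wd discount 0 cnt
  norm_num at this ⊢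
  exact this

theorem solution_eq (want : List String) (number : List Int) (discount : List String)
    (hpre : want.length ≤ number.length) :
    solution want number discount = solution_alt want number discount := by
  unfold solution solution_alt
  rw [pv_wd_eq want number hpre]
  set wd := (want.zip number).foldl (fun d kv => d.insert kv.1 kv.2) PySem.Dict.empty with hwd
  set w0 := PySem.Dict.counter (PySem.List.slice discount none (some 10)) with hw0
  have hinv0 := pv_inv_counter discount
  have hc0 : pvSubEmpty wd w0 = pvCheck wd (pvWin discount 0) :=
    pv_subEmpty_eq_check wd w0 _ hinv0.2.1 hinv0.2.2
  have h01 : PySem.List.pyRange 0 1 1 = [0] := by decide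
  by_cases hlen : discount.length < 10
  · have hmax : max 1 ((discount.length : Int) - 9) = 1 := by omega
    rw [PySem.List.pyRange_one_eq_nil (a := 10) (b := (discount.length : Int))
      (by exact_mod_cast Nat.le_of_lt hlen), hmax, h01]
    simp only [List.foldl_cons, List.foldl_nil]
    rw [pv_body_zero, hc0]
  · have hmax : max 1 ((discount.length : Int) - 9) = 1 + ((discount.length - 10 : Nat) : Int) := by
      push_cast; omega
    have hcast : (discount.length : Int) = 10 + ((discount.length - 10 : Nat) : Int) := by
      omega
    rw [hmax, PySem.List.pyRange_one_append 0 1 (1 + ((discount.length - 10 : Nat) : Int))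
      (by omega) (by omega), List.foldl_append, h01, hcast]
    obtain ⟨-, hcnt⟩ := pv_loopA wd discount w0 (if pvSubEmpty wd w0 then 0 + 1 else 0) hinv0
      (discount.length - 10) (by omega)
    rw [hcnt]
    simp only [List.foldl_cons, List.foldl_nil]
    rw [pv_body_zero, hc0]

-- ===== VERDICT (by name: the statement is the Claim_ definition above) =====
theorem solution_spec : Claim_equal_solution := by
  intro want number discount _ hpre
  unfold Spec_solution
  exact solution_eq want number discount hpre
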